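-- pv_equiv track=rewrite | github.com/sfu-natlang/HMM-Aligner | src/models/HMMOld.py | maxTargetSentenceLength
-- ===== SOURCE A (Python) =====
-- from collections import defaultdict
--
-- def maxTargetSentenceLength(biText):
--     maxLength = 0
--     targetLengthSet = defaultdict(int)
--     for (f, e) in biText:
--         tempLength = len(e)
--         if tempLength > maxLength:
--             maxLength = tempLength
--         targetLengthSet[tempLength] += 1
--     return (maxLength, targetLengthSet)
-- ===== SOURCE B (Python) =====
-- from collections import defaultdict
--
-- def maxTargetSentenceLength(biText):
--     lengths = [len(e) for (f, e) in biText]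
--     targetLengthSet = defaultdict(int)
--     for L in lengths:
--         if L not in targetLengthSet:
--             targetLengthSet[L] = lengths.count(L)
--     return (max(lengths, default=0), targetLengthSet)
-- ===== Notes on version B (the rewrite author's own statement) =====
-- stated objective: alternative
-- what changed: B first projects biText to the list of target lengths, then fills the histogram by counting each distinct length with lengths.count (a full scan per first occurrence) instead of incrementing a counter per sentence, and takes the max over the lengths list; it trades A's single incremental pass for a project-then-count-by-scan scheme.
import Mathlib
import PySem

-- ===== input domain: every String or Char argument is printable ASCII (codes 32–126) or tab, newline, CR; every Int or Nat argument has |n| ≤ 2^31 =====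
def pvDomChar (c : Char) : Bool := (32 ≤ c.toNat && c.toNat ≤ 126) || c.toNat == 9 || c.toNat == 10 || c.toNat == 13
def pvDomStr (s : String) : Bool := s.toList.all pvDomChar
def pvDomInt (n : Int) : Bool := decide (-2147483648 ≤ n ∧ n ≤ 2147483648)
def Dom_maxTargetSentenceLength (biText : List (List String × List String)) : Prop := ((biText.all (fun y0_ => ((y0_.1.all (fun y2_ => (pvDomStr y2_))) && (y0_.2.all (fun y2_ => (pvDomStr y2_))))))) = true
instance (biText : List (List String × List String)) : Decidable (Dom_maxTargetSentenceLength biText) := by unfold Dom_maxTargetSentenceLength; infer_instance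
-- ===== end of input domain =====

-- B projects biText to a list of target lengths, fills the histogram by counting each
-- distinct length with a full-scan lengths.count at its first occurrence, and takes the
-- max over that list (objective: alternative scheme, not faster).

-- ===== PORT A =====
def maxTargetSentenceLength (biText : List (List String × List String)) : Int × (List (Int × Int)) :=
  let st := biText.foldl
    (fun (st : Int × PySem.Dict Int Int) fe =>
      let tempLength : Int := (fe.2.length : Int)
      let maxLength : Int := if tempLength > st.1 then tempLength else st.1
      (maxLength, st.2.modify tempLength 0 (· + 1)))
    (0, PySem.Dict.empty)
  (st.1, st.2.items)

-- ===== PORT B =====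
def maxTargetSentenceLength_alt (biText : List (List String × List String)) : Int × (List (Int × Int)) :=
  let lengths : List Int := biText.map (fun fe => (fe.2.length : Int))
  let d := lengths.foldl
    (fun (d : PySem.Dict Int Int) L =>
      if d.contains L then d else d.insert L ((lengths.count L : Int)))
    PySem.Dict.empty
  let maxLength : Int :=
    match PySem.List.max? lengths (fun x => x) with
    | some m => m
    | none => 0
  (maxLength, d.items)

-- ===== PRECONDITION & SPEC =====
def Spec_maxTargetSentenceLength (biText : List (List String × List String)) (out : Int × (List (Int × Int))) : Prop := out = maxTargetSentenceLength_alt biText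
instance (biText : List (List String × List String)) (out : Int × (List (Int × Int))) : Decidable (Spec_maxTargetSentenceLength biText out) := by unfold Spec_maxTargetSentenceLength; infer_instance

-- ===== CLAIM (what is proved, stated in full; the proofs are below) =====
def Claim_equal_maxTargetSentenceLength : Prop := ∀ (biText : List (List String × List String)), Dom_maxTargetSentenceLength biText → Spec_maxTargetSentenceLength biText (maxTargetSentenceLength biText)

-- ===== LEMMAS AND PROOFS =====

-- A's paired fold splits into two independent folds (running max / histogram).
theorem pvFold_split (l : List (List String × List String)) (m : Int) (d : PySem.Dict Int Int) :
    l.foldl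
      (fun (st : Int × PySem.Dict Int Int) fe =>
        let tempLength : Int := (fe.2.length : Int)
        let maxLength : Int := if tempLength > st.1 then tempLength else st.1
        (maxLength, st.2.modify tempLength 0 (· + 1)))
      (m, d)
    = (l.foldl (fun (m : Int) fe => if ((fe.2.length : Int)) > m then ((fe.2.length : Int)) else m) m,
       l.foldl (fun (d : PySem.Dict Int Int) fe => d.modify ((fe.2.length : Int)) 0 (· + 1)) d) := by
  induction l generalizing m d with
  | nil => rfl
  | cons x t ih => simp only [List.foldl_cons]; exact ih _ _

-- the running max is its initial value or an element, and bounds initial value and elements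
theorem pvRunMax (l : List Int) (m : Int) :
    (l.foldl (fun m L => if L > m then L else m) m = m ∨
      l.foldl (fun m L => if L > m then L else m) m ∈ l) ∧
    m ≤ l.foldl (fun m L => if L > m then L else m) m ∧
    ∀ y ∈ l, y ≤ l.foldl (fun m L => if L > m then L else m) m := by
  induction l generalizing m with
  | nil => simp
  | cons x t ih =>
    simp only [List.foldl_cons, List.mem_cons]
    by_cases h : x > m
    · simp only [if_pos h]
      obtain ⟨hmem, hle, hbd⟩ := ih x
      exact ⟨hmem.elim (fun h' => Or.inr (Or.inl h')) (fun h' => Or.inr (Or.inr h')),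
        by omega,
        fun y hy => hy.elim (fun h' => by omega) (hbd y)⟩
    · simp only [if_neg h]
      obtain ⟨hmem, hle, hbd⟩ := ih m
      exact ⟨hmem.elim Or.inl (fun h' => Or.inr (Or.inr h')), hle,
        fun y hy => hy.elim (fun h' => by omega) (hbd y)⟩

-- the keys B's loop inserts, in order: first occurrences among l not already in `seen`
def pvNew (seen : List Int) : List Int → List Int
  | [] => []
  | x :: t => if x ∈ seen then pvNew seen t else x :: pvNew (seen ++ [x]) t

theorem pvSet_update_eq (l seen : List Int) :
    PySem.Set.update seen l = seen ++ pvNew seen l := by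
  induction l generalizing seen with
  | nil => simp [PySem.Set.update, pvNew]
  | cons x t ih =>
    have hstep : PySem.Set.update seen (x :: t) = PySem.Set.update (PySem.Set.add seen x) t := rfl
    rw [hstep]
    by_cases h : x ∈ seen
    · have ha : PySem.Set.add seen x = seen := by
        simp [PySem.Set.add, PySem.Set.contains, h]
      rw [ha, ih seen]
      simp [pvNew, h]
    · have ha : PySem.Set.add seen x = seen ++ [x] := by
        simp [PySem.Set.add, PySem.Set.contains, h]
      rw [ha, ih (seen ++ [x])]
      simp [pvNew, h, List.append_assoc]

-- B's insert-if-fresh loop appends exactly the new keys with their values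
theorem pvFoldB_items (v : Int → Int) (l : List Int) (d : PySem.Dict Int Int) :
    (l.foldl (fun (d : PySem.Dict Int Int) L =>
        if d.contains L then d else d.insert L (v L)) d).items
      = d.items ++ (pvNew d.keys l).map (fun k => (k, v k)) := by
  induction l generalizing d with
  | nil => simp [pvNew]
  | cons x t ih =>
    simp only [List.foldl_cons, pvNew]
    by_cases h : x ∈ d.keys
    · have hc : d.contains x = true := (PySem.Dict.contains_iff_mem_keys d x).mpr h
      rw [if_pos hc, if_pos h]
      exact ih d
    · have hc : d.contains x = false := by
        cases hcc : d.contains x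
        · rfl
        · exact absurd ((PySem.Dict.contains_iff_mem_keys d x).mp hcc) h
      rw [if_neg (by rw [hc]; exact Bool.false_ne_true), if_neg h]
      have hkeys := PySem.Dict.keys_insert_of_not_contains (d := d) (k := x) (v := v x) hc
      have hitems := PySem.Dict.items_insert_of_not_contains (d := d) (k := x) (v := v x) hc
      rw [ih (d.insert x (v x)), hitems, hkeys]
      simp [List.append_assoc]

theorem maxTargetSentenceLength_spec : Claim_equal_maxTargetSentenceLength := by
  intro biText _
  unfold Spec_maxTargetSentenceLength maxTargetSentenceLength maxTargetSentenceLength_alt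
  simp only
  rw [pvFold_split]
  set lengths := biText.map (fun fe => ((fe.2.length : Int))) with hlens
  refine Prod.ext ?_ ?_
  · -- max component
    simp only
    have hfold : biText.foldl (fun (m : Int) fe => if ((fe.2.length : Int)) > m then ((fe.2.length : Int)) else m) 0
        = lengths.foldl (fun m L => if L > m then L else m) 0 := by
      rw [hlens, List.foldl_map]
    rw [hfold]
    obtain ⟨hmem, -, hbd⟩ := pvRunMax lengths 0
    cases hmax : PySem.List.max? lengths (fun x => x) with
    | none =>
      have hnil : lengths = [] := (PySem.List.max?_eq_none_iff lengths (fun x => x)).mp hmax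
      rw [hnil]; rfl
    | some b =>
      have hbmem : b ∈ lengths := PySem.List.max?_mem hmax
      have hb0 : 0 ≤ b := by
        rw [hlens] at hbmem
        obtain ⟨fe, -, rfl⟩ := List.mem_map.mp hbmem
        positivity
      have hble := hbd b hbmem
      have hgeb : lengths.foldl (fun m L => if L > m then L else m) 0 ≤ b := by
        rcases hmem with h | h
        · omega
        · exact PySem.List.max?_isMax hmax _ h
      exact le_antisymm hgeb hble
  · -- histogram component
    simp only
    have hA : biText.foldl (fun (d : PySem.Dict Int Int) fe => d.modify ((fe.2.length : Int)) 0 (· + 1))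
          (PySem.Dict.empty : PySem.Dict Int Int)
        = PySem.Dict.counter lengths := by
      rw [PySem.Dict.counter_eq_foldl, hlens, List.foldl_map]
    rw [hA, PySem.Dict.items_counter,
        pvFoldB_items (fun k => (lengths.count k : Int)) lengths PySem.Dict.empty]
    have hkeys : (PySem.Dict.empty : PySem.Dict Int Int).keys = [] := by
      simp [PySem.Dict.keys_empty]
    have hitemsE : (PySem.Dict.empty : PySem.Dict Int Int).items = [] := rfl
    rw [hkeys, hitemsE]
    have hofList : (PySem.Set.ofList lengths : List Int) = pvNew [] lengths := by
      have := pvSet_update_eq lengths []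
      simpa [PySem.Set.update, PySem.Set.ofList] using this
    rw [hofList]
    simp
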